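-- pv_equiv track=rewrite | github.com/christopherlam888/CCC-Senior-Practice | CCC '03 S2 - Poetry.py | find_vowel
-- ===== SOURCE A (Python) =====
-- def find_vowel(line):
--     lineList = list(line)
--     counter = len(lineList)-1
--     while counter >= 0:
--         if lineList[counter] == "a" or lineList[counter] == "e" or lineList[counter] == "i" or lineList[counter] == "o" or lineList[counter] == "u":
--             return counter
--         elif lineList[counter] == " ":
--             counter = -1
--         else:
--             counter -= 1
--     return len(line) - len(line.split(" ")[-1])
-- ===== SOURCE B (Python) =====
-- def find_vowel(line):
--     # single forward pass with an accumulator: a space moves the candidate to the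
--     # start of the next word, a vowel moves it to the current index; the final
--     # value is the last vowel of the last word, or the last word's start index
--     ans = 0
--     for i, ch in enumerate(line):
--         if ch == " ":
--             ans = i + 1
--         elif ch in "aeiou":
--             ans = i
--     return ans
-- ===== Notes on version B (the rewrite author's own statement) =====
-- stated objective: simpler
-- what changed: A scans the whole string backward with a space-break branch plus a str.split-based fallback; B makes a single forward pass with an accumulator (a space sets the candidate to the next index, a vowel sets it to the current index), so there is no backward scan and no fallback computation at all.
import Mathlib
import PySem

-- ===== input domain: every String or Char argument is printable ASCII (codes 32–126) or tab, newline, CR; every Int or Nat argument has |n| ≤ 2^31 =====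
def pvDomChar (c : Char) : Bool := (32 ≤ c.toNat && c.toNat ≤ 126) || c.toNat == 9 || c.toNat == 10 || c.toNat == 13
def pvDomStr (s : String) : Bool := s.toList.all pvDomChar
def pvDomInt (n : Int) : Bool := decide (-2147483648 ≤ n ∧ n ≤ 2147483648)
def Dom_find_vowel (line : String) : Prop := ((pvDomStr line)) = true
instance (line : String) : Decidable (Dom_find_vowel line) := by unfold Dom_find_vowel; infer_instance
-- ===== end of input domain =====

-- B replaces A's whole-string backward scan (with its space-break branch and a str.split-based
-- fallback) by one forward pass with an accumulator and no fallback; objective: simpler.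

-- ===== PORT A =====
-- A's while loop, counter stepping down; a space sets counter to -1 (exit), so at counter = 0 a
-- non-vowel always exits the loop (both the space branch and the decrement leave the loop).
-- lineList[counter] is always in range at every call, so getD's default is never used.
def findVowelLoopA (lineList : List Char) : Nat → Option Int
  | 0 =>
    let c := lineList.getD 0 ' '
    if c == 'a' || c == 'e' || c == 'i' || c == 'o' || c == 'u' then some 0 else none
  | counter+1 =>
    let c := lineList.getD (counter+1) ' '
    if c == 'a' || c == 'e' || c == 'i' || c == 'o' || c == 'u' then some ((counter : Int)+1)
    else if c == ' ' then none
    else findVowelLoopA lineList counter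

def find_vowel (line : String) : Int :=
  let lineList := line.toList
  let scanned : Option Int :=
    match lineList.length with
    | 0 => none                          -- counter = -1: the while loop body never runs
    | n+1 => findVowelLoopA lineList n
  match scanned with
  | some i => i
  | none =>
    -- len(line) - len(line.split(" ")[-1]); split? is some (sep ≠ "") and its result is
    -- nonempty, so pyGet? (-1) is some: the getD defaults are never used.
    PySem.Str.len line -
      PySem.Str.len ((PySem.List.pyGet? ((PySem.Str.split? line " ").getD []) (-1)).getD "")

-- ===== PORT B =====
-- single forward pass: a space moves the candidate to the next index, a vowel to this index
def find_vowel_alt (line : String) : Int :=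
  (PySem.List.enumerate line.toList).foldl
    (fun ans p =>
      if p.2 == ' ' then p.1 + 1
      else if "aeiou".toList.contains p.2 then p.1
      else ans) 0

-- ===== PRECONDITION & SPEC =====
def Spec_find_vowel (line : String) (out : Int) : Prop := out = find_vowel_alt line
instance (line : String) (out : Int) : Decidable (Spec_find_vowel line out) := by unfold Spec_find_vowel; infer_instance

-- ===== CLAIM (what is proved, stated in full; the proofs are below) =====
def Claim_equal_find_vowel : Prop := ∀ (line : String), Dom_find_vowel line → Spec_find_vowel line (find_vowel line)

-- ===== LEMMAS AND PROOFS =====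

-- A's value as a function of the character list (fallback expressed through gSeg below)
def gSeg : List Char → Int → Int
  | [], k => k
  | c :: rest, k => if c = ' ' then gSeg rest 0 else gSeg rest (k+1)

def aVal (l : List Char) : Int :=
  match l.length with
  | 0 => (l.length : Int) - gSeg l 0
  | n+1 =>
    match findVowelLoopA l n with
    | some i => i
    | none => (l.length : Int) - gSeg l 0

theorem contains_aeiou (c : Char) :
    ("aeiou".toList.contains c) = (c == 'a' || c == 'e' || c == 'i' || c == 'o' || c == 'u') := by
  have h : "aeiou".toList = ['a','e','i','o','u'] := rfl
  rw [h]
  rcases Decidable.em (c = 'a') with h1|h1 <;> rcases Decidable.em (c = 'e') with h2|h2 <;>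
    rcases Decidable.em (c = 'i') with h3|h3 <;> rcases Decidable.em (c = 'o') with h4|h4 <;>
    rcases Decidable.em (c = 'u') with h5|h5 <;> simp_all

-- the last piece produced by splitOn's worker has the length gSeg predicts
theorem splitOn_go_last : ∀ (fuel : Nat) (l cur : List Char) (acc : List (List Char)),
    l.length < fuel →
    ∃ w, (PySem.Chars.splitOn.go [' '] fuel l cur acc).getLast? = some w ∧
      (w.length : Int) = gSeg l (cur.length : Int) := by
  intro fuel
  induction fuel with
  | zero => intro l cur acc h; omega
  | succ f ih =>
    intro l cur acc h
    cases l with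
    | nil =>
      refine ⟨cur.reverse, ?_, by simp [gSeg]⟩
      simp [PySem.Chars.splitOn.go, List.getLast?_reverse]
    | cons c rest =>
      by_cases hc : c = ' '
      · subst hc
        have hpre : [' '].isPrefixOf (' ' :: rest) = true := by simp [List.isPrefixOf]
        have : PySem.Chars.splitOn.go [' '] (f+1) (' ' :: rest) cur acc
            = PySem.Chars.splitOn.go [' '] f rest [] (cur.reverse :: acc) := by
          simp [PySem.Chars.splitOn.go, hpre]
        rw [this]
        obtain ⟨w, hw, hl⟩ := ih rest [] (cur.reverse :: acc) (by simpa using Nat.lt_of_succ_lt_succ h)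
        exact ⟨w, hw, by simpa [gSeg] using hl⟩
      · have hpre : [' '].isPrefixOf (c :: rest) = false := by
          simp [List.isPrefixOf]; exact fun h => hc h.symm
        have : PySem.Chars.splitOn.go [' '] (f+1) (c :: rest) cur acc
            = PySem.Chars.splitOn.go [' '] f rest (c :: cur) acc := by
          simp [PySem.Chars.splitOn.go, hpre]
        rw [this]
        obtain ⟨w, hw, hl⟩ := ih rest (c :: cur) acc (by simpa using Nat.lt_of_succ_lt_succ h)
        refine ⟨w, hw, ?_⟩
        rw [hl]
        simp [gSeg, hc]

-- A's fallback value equals len - gSeg cs 0, i.e. find_vowel line = aVal line.toList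
theorem fallback_eq (line : String) :
    (PySem.Str.len line -
      PySem.Str.len ((PySem.List.pyGet? ((PySem.Str.split? line " ").getD []) (-1)).getD ""))
    = (line.toList.length : Int) - gSeg line.toList 0 := by
  obtain ⟨w, hw, hl⟩ := splitOn_go_last (line.toList.length + 1) line.toList [] [] (by omega)
  have hsep : " ".toList = [' '] := rfl
  have hsplit : PySem.Str.split? line " "
      = some ((PySem.Chars.splitOn line.toList [' ']).map String.ofList) := by
    simp [PySem.Str.split?, PySem.Chars.split?, hsep]
  have hpieces : (PySem.Chars.splitOn line.toList [' ']).getLast? = some w := by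
    simpa [PySem.Chars.splitOn] using hw
  set parts := (PySem.Chars.splitOn line.toList [' ']).map String.ofList with hparts
  have hlast : parts.getLast? = some (String.ofList w) := by
    simp [hparts, List.getLast?_map, hpieces]
  have hne : parts ≠ [] := by
    intro h; rw [h] at hlast; simp at hlast
  have hlen : 0 < parts.length := List.length_pos_of_ne_nil hne
  have hget : PySem.List.pyGet? parts (-1) = some (String.ofList w) := by
    simp only [PySem.List.pyGet?, PySem.List.pyIdx?]
    rw [if_neg (by omega), if_pos (by omega)]
    simpa [List.getLast?_eq_getElem?] using hlast
  rw [hsplit]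
  simp only [Option.getD_some, hget]
  simp [PySem.Str.len, hl]

theorem find_vowel_eq_aVal (line : String) : find_vowel line = aVal line.toList := by
  have hf := fallback_eq line
  simp only [find_vowel, aVal]
  cases hE : line.toList with
  | nil =>
    rw [hE] at hf
    exact hf
  | cons d rest =>
    rw [hE] at hf
    show (match findVowelLoopA (d :: rest) rest.length with
          | some i => i
          | none => PySem.Str.len line -
              PySem.Str.len ((PySem.List.pyGet? ((PySem.Str.split? line " ").getD []) (-1)).getD ""))
        = (match findVowelLoopA (d :: rest) rest.length with
          | some i => i
          | none => ((d :: rest).length : Int) - gSeg (d :: rest) 0)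
    cases findVowelLoopA (d :: rest) rest.length with
    | some i => rfl
    | none => exact hf

-- gSeg over an appended character
theorem gSeg_append : ∀ (l : List Char) (c : Char) (k : Int),
    gSeg (l ++ [c]) k = if c = ' ' then 0 else gSeg l k + 1 := by
  intro l
  induction l with
  | nil => intro c k; simp [gSeg]
  | cons d rest ih =>
    intro c k
    simp only [List.cons_append, gSeg]
    split_ifs with hd <;> rw [ih] <;> simp_all

-- the A loop ignores a character appended past its index range
theorem loopA_append : ∀ (k : Nat) (l : List Char) (c : Char), k < l.length →
    findVowelLoopA (l ++ [c]) k = findVowelLoopA l k := by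
  intro k
  induction k with
  | zero =>
    intro l c hk
    simp only [findVowelLoopA]
    rw [List.getD_append _ _ _ _ hk]
  | succ k ih =>
    intro l c hk
    simp only [findVowelLoopA]
    rw [List.getD_append _ _ _ _ hk]
    rw [ih l c (by omega)]

-- the A loop at the top index of l ++ [c], peeled one step
theorem loopA_top (l : List Char) (c : Char) :
    findVowelLoopA (l ++ [c]) l.length =
      if (c == 'a' || c == 'e' || c == 'i' || c == 'o' || c == 'u') then some (l.length : Int)
      else if c == ' ' then none
      else match l.length with
        | 0 => none
        | m+1 => findVowelLoopA l m := by
  have hget : (l ++ [c]).getD l.length ' ' = c := by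
    simp [List.getD]
  cases hL : l.length with
  | zero =>
    have hnil : l = [] := List.length_eq_zero_iff.mp hL
    subst hnil
    simp only [List.nil_append, findVowelLoopA, List.getD]
    split_ifs <;> simp_all
  | succ m =>
    rw [hL] at hget
    simp only [findVowelLoopA, hget]
    split_ifs with h1 h2
    · simp
    · rfl
    · rw [loopA_append m l c (by omega)]

-- B's fold after appending one character
theorem foldB_append (l : List Char) (c : Char) :
    (PySem.List.enumerate (l ++ [c])).foldl
      (fun ans p =>
        if p.2 == ' ' then p.1 + 1
        else if "aeiou".toList.contains p.2 then p.1
        else ans) 0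
    = (if c == ' ' then (l.length : Int) + 1
       else if "aeiou".toList.contains c then (l.length : Int)
       else (PySem.List.enumerate l).foldl
         (fun ans p =>
           if p.2 == ' ' then p.1 + 1
           else if "aeiou".toList.contains p.2 then p.1
           else ans) 0) := by
  rw [PySem.List.enumerate_append, List.foldl_append]
  simp [PySem.List.enumerate_cons, PySem.List.enumerate_nil]

-- main equality, by reverse induction on the character list
theorem aVal_eq_foldB : ∀ (l : List Char),
    aVal l = (PySem.List.enumerate l).foldl
      (fun ans p =>
        if p.2 == ' ' then p.1 + 1
        else if "aeiou".toList.contains p.2 then p.1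
        else ans) 0 := by
  intro l
  induction l using List.reverseRecOn with
  | nil => simp [aVal, gSeg, PySem.List.enumerate_nil]
  | append_singleton l c ih =>
    rw [foldB_append, contains_aeiou]
    have hlen : (l ++ [c]).length = l.length + 1 := by simp
    simp only [aVal, hlen, loopA_top]
    by_cases hv : (c == 'a' || c == 'e' || c == 'i' || c == 'o' || c == 'u') = true
    · -- last char is a vowel: A returns its index, B's accumulator ends there
      have hcs : c ≠ ' ' := by
        intro h; subst h; exact absurd hv (by decide)
      rw [if_pos hv, if_neg (by simpa using hcs), if_pos hv]
    · rw [if_neg hv]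
      by_cases hsp : c = ' '
      · -- last char is a space: A falls through to the fallback len l + 1, B's pass ends there
        subst hsp
        rw [if_pos (by simp), if_pos (by simp)]
        have hg : gSeg (l ++ [' ']) 0 = 0 := by rw [gSeg_append]; simp
        rw [hg]
        show ((l.length + 1 : Nat) : Int) - 0 = (l.length : Int) + 1
        push_cast
        ring
      · -- ordinary character: both sides keep the value they had on l
        rw [if_neg (by simpa using hsp), if_neg (by simpa using hsp), if_neg hv, ← ih]
        have hg : gSeg (l ++ [c]) 0 = gSeg l 0 + 1 := by rw [gSeg_append]; simp [hsp]
        rw [hg]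
        simp only [aVal]
        cases hL : l.length with
        | zero => simp [gSeg, List.length_eq_zero_iff.mp hL]
        | succ m =>
          show (match findVowelLoopA l m with
                | some i => i
                | none => ((m + 1 + 1 : Nat) : Int) - (gSeg l 0 + 1))
              = (match findVowelLoopA l m with
                | some i => i
                | none => ((m + 1 : Nat) : Int) - gSeg l 0)
          cases findVowelLoopA l m with
          | some i => rfl
          | none => push_cast; ring

-- ===== VERDICT (by name: the statement is the Claim_ definition above) =====
theorem find_vowel_spec : Claim_equal_find_vowel := by
  intro line _
  show find_vowel line = find_vowel_alt line
  rw [find_vowel_eq_aVal, find_vowel_alt, aVal_eq_foldB]
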